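-- pv_equiv track=rewrite | github.com/kayvonavishan/algo-meta-model-agent | agentic_experimentation/tree_runner.py | _collect_context_idea_dirs
-- ===== SOURCE A (Python) =====
-- from typing import Any, Optional
--
-- def _collect_ancestor_node_ids(manifest: dict[str, Any], node_id: str) -> list[str]:
--     nodes = manifest.get("nodes") or {}
--     cur = node_id
--     chain = []
--     while cur:
--         chain.append(cur)
--         rec = nodes.get(cur) or {}
--         cur = rec.get("parent_node_id")
--     return list(reversed(chain))
--
-- def _collect_context_idea_dirs(manifest: dict[str, Any], node_id: str) -> list[str]:
--     nodes = manifest.get("nodes") or {}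
--     chain = _collect_ancestor_node_ids(manifest, node_id)
--     dirs: list[str] = []
--     for nid in chain:
--         rec = nodes.get(nid) or {}
--         d = rec.get("node_ideas_dir")
--         if d and str(d) not in dirs:
--             dirs.append(str(d))
--     return dirs
-- ===== SOURCE B (Python) =====
-- def _collect_context_idea_dirs(manifest, node_id):
--     nodes = manifest.get("nodes") or {}
--     dirs = []
--     cur = node_id
--     while cur:
--         rec = nodes.get(cur) or {}
--         d = rec.get("node_ideas_dir")
--         if d:
--             dirs.append(str(d))
--         cur = rec.get("parent_node_id")
--     out = []
--     for d in reversed(dirs):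
--         if d not in out:
--             out.append(d)
--     return out
-- ===== Notes on version B (the rewrite author's own statement) =====
-- stated objective: simpler
-- what changed: B replaces A's helper that builds and reverses the ancestor-id chain plus a second per-id lookup loop by one upward walk that collects each node's ideas dir directly, then reverses and deduplicates the collected dirs.
import Mathlib
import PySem

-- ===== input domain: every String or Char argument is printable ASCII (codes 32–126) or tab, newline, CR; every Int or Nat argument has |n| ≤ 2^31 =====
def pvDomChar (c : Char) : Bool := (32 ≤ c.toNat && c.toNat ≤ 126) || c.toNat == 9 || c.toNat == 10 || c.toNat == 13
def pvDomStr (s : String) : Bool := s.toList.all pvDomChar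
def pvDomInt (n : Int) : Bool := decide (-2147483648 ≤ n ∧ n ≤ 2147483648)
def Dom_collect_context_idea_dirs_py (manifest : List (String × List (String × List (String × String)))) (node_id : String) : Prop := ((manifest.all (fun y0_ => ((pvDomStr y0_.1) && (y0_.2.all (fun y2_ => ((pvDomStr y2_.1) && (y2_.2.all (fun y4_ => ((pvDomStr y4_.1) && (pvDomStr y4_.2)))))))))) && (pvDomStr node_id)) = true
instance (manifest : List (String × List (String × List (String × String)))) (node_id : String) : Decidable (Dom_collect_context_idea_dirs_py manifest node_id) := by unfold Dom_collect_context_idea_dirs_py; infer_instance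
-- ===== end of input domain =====

-- ===== PORT A =====
-- B changes decomposition only (one upward walk collecting dirs, then reverse+dedup,
-- instead of A's id-chain helper + reverse + second lookup loop); not claimed faster.
-- Shared helpers: the Python dict lookups ('manifest.get("nodes") or {}', 'nodes.get(cur) or {}',
-- 'rec.get(k)' with None/'' both falsy, mapped to the "" sentinel).
def pvNodes (manifest : List (String × List (String × List (String × String)))) :
    List (String × List (String × String)) :=
  (PySem.Dict.get? (PySem.Dict.mk manifest) "nodes").getD []

def pvRec (nodes : List (String × List (String × String))) (cur : String) :
    List (String × String) :=
  (PySem.Dict.get? (PySem.Dict.mk nodes) cur).getD []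

def pvField (nodes : List (String × List (String × String))) (cur k : String) : String :=
  (PySem.Dict.get? (PySem.Dict.mk (pvRec nodes cur)) k).getD ""

-- A's while loop in _collect_ancestor_node_ids; the fuel argument only makes it total
-- (Pre_ guarantees the Python loop terminates within nodes.length + 2 steps).
def pvChainAux (nodes : List (String × List (String × String))) :
    Nat → String → List String → List String
  | 0, _, chain => chain
  | n + 1, cur, chain =>
    if cur = "" then chain
    else pvChainAux nodes n (pvField nodes cur "parent_node_id") (chain ++ [cur])

def collect_ancestor_node_ids_py (manifest : List (String × List (String × List (String × String)))) (node_id : String) : List String :=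
  let nodes := pvNodes manifest
  (pvChainAux nodes (nodes.length + 2) node_id []).reverse

def collect_context_idea_dirs_py (manifest : List (String × List (String × List (String × String)))) (node_id : String) : List String :=
  let nodes := pvNodes manifest
  let chain := collect_ancestor_node_ids_py manifest node_id
  chain.foldl (fun dirs nid =>
    let d := pvField nodes nid "node_ideas_dir"
    if d ≠ "" ∧ d ∉ dirs then dirs ++ [d] else dirs) []

-- ===== PORT B =====
-- Source B's single upward walk, appending each truthy node_ideas_dir (fuel as in port A).
def pvWalkAux (nodes : List (String × List (String × String))) :
    Nat → String → List String → List String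
  | 0, _, dirs => dirs
  | n + 1, cur, dirs =>
    if cur = "" then dirs
    else
      let d := pvField nodes cur "node_ideas_dir"
      pvWalkAux nodes n (pvField nodes cur "parent_node_id")
        (if d ≠ "" then dirs ++ [d] else dirs)

def collect_context_idea_dirs_py_alt (manifest : List (String × List (String × List (String × String)))) (node_id : String) : List String :=
  let nodes := pvNodes manifest
  let dirs := pvWalkAux nodes (nodes.length + 2) node_id []
  dirs.reverse.foldl (fun out d => if d ∉ out then out ++ [d] else out) []

-- ===== PRECONDITION & SPEC =====
-- Pre_ excludes exactly the inputs whose parent chain never reaches a falsy id (a cycle),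
-- on which Python A loops forever (no value is returned).
def Pre_collect_context_idea_dirs_py (manifest : List (String × List (String × List (String × String)))) (node_id : String) : Prop :=
  ∃ k < (pvNodes manifest).length + 2,
    (fun cur => pvField (pvNodes manifest) cur "parent_node_id")^[k] node_id = ""
instance (manifest : List (String × List (String × List (String × String)))) (node_id : String) : Decidable (Pre_collect_context_idea_dirs_py manifest node_id) := by unfold Pre_collect_context_idea_dirs_py; infer_instance

def pvWitness_collect_context_idea_dirs_py : (List (String × List (String × List (String × String)))) × String :=
  ([("nodes", [("a", [("node_ideas_dir", "d1"), ("parent_node_id", "b")]),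
               ("b", [("node_ideas_dir", "d1")])])], "a")

def Spec_collect_context_idea_dirs_py (manifest : List (String × List (String × List (String × String)))) (node_id : String) (out : List String) : Prop := out = collect_context_idea_dirs_py_alt manifest node_id
instance (manifest : List (String × List (String × List (String × String)))) (node_id : String) (out : List String) : Decidable (Spec_collect_context_idea_dirs_py manifest node_id out) := by unfold Spec_collect_context_idea_dirs_py; infer_instance

-- ===== CLAIM (what is proved, stated in full; the proofs are below) =====
def Claim_equal_collect_context_idea_dirs_py : Prop := ∀ (manifest : List (String × List (String × List (String × String)))) (node_id : String), Dom_collect_context_idea_dirs_py manifest node_id → Pre_collect_context_idea_dirs_py manifest node_id → Spec_collect_context_idea_dirs_py manifest node_id (collect_context_idea_dirs_py manifest node_id)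

-- ===== LEMMAS AND PROOFS =====

-- A's chain loop with accumulator `chain` prepends the accumulator.
theorem pvChainAux_acc (nodes : List (String × List (String × String))) :
    ∀ (n : Nat) (cur : String) (chain : List String),
      pvChainAux nodes n cur chain = chain ++ pvChainAux nodes n cur [] := by
  intro n
  induction n with
  | zero => intro cur chain; simp [pvChainAux]
  | succ n ih =>
    intro cur chain
    simp only [pvChainAux]
    by_cases h : cur = ""
    · simp [h]
    · simp only [h, if_false]
      rw [ih _ (chain ++ [cur]), ih _ ([] ++ [cur])]
      simp

-- B's walk collects exactly the nonempty dirs of A's chain, in chain order.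
theorem pvWalkAux_eq_chain (nodes : List (String × List (String × String))) :
    ∀ (n : Nat) (cur : String) (dirs : List String),
      pvWalkAux nodes n cur dirs =
        dirs ++ ((pvChainAux nodes n cur []).map
          (fun nid => pvField nodes nid "node_ideas_dir")).filter (· ≠ "") := by
  intro n
  induction n with
  | zero => intro cur dirs; simp [pvWalkAux, pvChainAux]
  | succ n ih =>
    intro cur dirs
    simp only [pvWalkAux, pvChainAux]
    by_cases h : cur = ""
    · simp [h]
    · simp only [h, if_false]
      rw [pvChainAux_acc nodes n _ ([] ++ [cur]), ih]
      by_cases hd : pvField nodes cur "node_ideas_dir" = ""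
      · simp [hd]
      · simp [hd]

-- Fusing A's second loop with the per-id lookup: folding A's step over a list of ids
-- equals folding B's dedup step over the corresponding nonempty dirs.
theorem fold_fusion (nodes : List (String × List (String × String))) :
    ∀ (ids : List String) (dirs : List String),
      ids.foldl (fun dirs nid =>
          let d := pvField nodes nid "node_ideas_dir"
          if d ≠ "" ∧ d ∉ dirs then dirs ++ [d] else dirs) dirs =
        ((ids.map (fun nid => pvField nodes nid "node_ideas_dir")).filter (· ≠ "")).foldl
          (fun out d => if d ∉ out then out ++ [d] else out) dirs := by
  intro ids
  induction ids with
  | nil => intro dirs; simp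
  | cons nid rest ih =>
    intro dirs
    simp only [List.foldl_cons, List.map_cons, List.filter_cons]
    by_cases hd : pvField nodes nid "node_ideas_dir" = ""
    · simp [hd, ih]
    · by_cases hm : pvField nodes nid "node_ideas_dir" ∈ dirs
      · simp [hd, hm, ih]
      · simp [hd, hm, ih]

-- ===== VERDICT (by name: the statement is the Claim_ definition above) =====
theorem collect_context_idea_dirs_py_spec : Claim_equal_collect_context_idea_dirs_py := by
  intro manifest node_id _ _
  unfold Spec_collect_context_idea_dirs_py
  unfold collect_context_idea_dirs_py collect_context_idea_dirs_py_alt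
    collect_ancestor_node_ids_py
  rw [fold_fusion]
  simp only [pvWalkAux_eq_chain, List.nil_append, List.filter_reverse, List.map_reverse]
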